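-- pv_equiv track=rewrite | github.com/nitin001singh/Data-Structure---Algorithm | OA/Program16.py | countWaysToSplitIntoFourParts
-- ===== SOURCE A (Python) =====
-- def countWaysToSplitIntoFourParts(nums):
--     total = sum(nums)
--     if total % 4 != 0:
--         return 0
--
--     part = total // 4
--     prefix_sum = 0
--     count_part1 = 0
--     count_part2 = 0
--     count = 0
--
--     for i in range(len(nums) - 1):
--         prefix_sum += nums[i]
--
--         if prefix_sum == 3 * part:
--             count += count_part2
--
--         if prefix_sum == 2 * part:
--             count_part2 += count_part1
--
--         if prefix_sum == part:
--             count_part1 += 1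
--
--     return count
-- ===== SOURCE B (Python) =====
-- def countWaysToSplitIntoFourParts(nums):
--     total = sum(nums)
--     if total % 4 != 0:
--         return 0
--     part = total // 4
--     # prefix sums at cut positions 0..n-2
--     prefixes = []
--     s = 0
--     for x in nums[:-1]:
--         s += x
--         prefixes.append(s)
--     # suf[j] = number of positions k >= j with prefixes[k] == 3*part
--     suf = [0] * (len(prefixes) + 1)
--     for j in range(len(prefixes) - 1, -1, -1):
--         suf[j] = suf[j + 1] + (1 if prefixes[j] == 3 * part else 0)
--     count = 0
--     c1 = 0
--     for j, q in enumerate(prefixes):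
--         if q == 2 * part:
--             count += c1 * suf[j + 1]
--         if q == part:
--             c1 += 1
--     return count
-- ===== Notes on version B (the rewrite author's own statement) =====
-- stated objective: alternative
-- what changed: Replaces the single left-to-right sweep that accumulates pair counts (count_part2) with a three-phase decomposition: materialize the prefix-sum list, precompute a suffix count of 3*part positions, then sweep multiplying the running count of part-positions by the suffix count at each 2*part position.
import Mathlib
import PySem

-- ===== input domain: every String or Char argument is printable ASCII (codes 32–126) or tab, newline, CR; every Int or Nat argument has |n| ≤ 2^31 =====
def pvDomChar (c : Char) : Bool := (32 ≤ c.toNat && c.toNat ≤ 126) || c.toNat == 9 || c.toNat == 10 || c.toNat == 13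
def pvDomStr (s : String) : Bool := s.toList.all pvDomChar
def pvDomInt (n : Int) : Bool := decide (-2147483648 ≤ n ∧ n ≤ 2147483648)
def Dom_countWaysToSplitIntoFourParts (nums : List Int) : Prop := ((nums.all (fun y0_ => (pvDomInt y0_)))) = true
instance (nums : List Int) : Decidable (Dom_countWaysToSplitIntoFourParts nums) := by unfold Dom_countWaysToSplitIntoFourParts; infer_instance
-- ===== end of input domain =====

-- B replaces A's single sweep (accumulating pair counts) with prefix list + suffix 3*part counts +
-- a sweep multiplying the running part-count by the suffix count; objective: alternative decomposition, same cost.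

-- ===== PORT A =====
-- one loop iteration of A: state (prefix_sum, count_part1, count_part2, count), x = nums[i]
def stepA (part : Int) (st : Int × Int × Int × Int) (x : Int) : Int × Int × Int × Int :=
  let ps := st.1 + x
  let cnt := if ps = 3 * part then st.2.2.2 + st.2.2.1 else st.2.2.2
  let c2 := if ps = 2 * part then st.2.2.1 + st.2.1 else st.2.2.1
  let c1 := if ps = part then st.2.1 + 1 else st.2.1
  (ps, c1, c2, cnt)

def countWaysToSplitIntoFourParts (nums : List Int) : Int :=
  let total := nums.sum
  if PySem.Int.mod total 4 ≠ 0 then 0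
  else
    let part := PySem.Int.floordiv total 4
    let st := (PySem.List.pyRange 0 ((nums.length : Int) - 1) 1).foldl
      (fun st i => stepA part st (PySem.List.pyGetD nums i 0)) (0, 0, 0, 0)
    st.2.2.2

-- ===== PORT B =====
-- prefixes: running prefix sums, one per element of nums[:-1]
def buildPref (s : Int) : List Int → List Int
  | [] => []
  | x :: t => (s + x) :: buildPref (s + x) t

-- suf built right-to-left: suf[j] = suf[j+1] + (prefixes[j] == 3*part); length |Q|+1
def sufList (p : Int) : List Int → List Int
  | [] => [0]
  | q :: t =>
      let rest := sufList p t
      (rest.headD 0 + (if q = 3 * p then 1 else 0)) :: rest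

-- the enumerate sweep: at position j (current suffix of suf starts at suf[j]), uses suf[j+1]
def loopB (p : Int) : List Int → List Int → Int → Int → Int
  | [], _, count, _ => count
  | q :: t, suf, count, c1 =>
      let sufT := suf.tail
      loopB p t sufT (if q = 2 * p then count + c1 * sufT.headD 0 else count)
        (if q = p then c1 + 1 else c1)

def countWaysToSplitIntoFourParts_alt (nums : List Int) : Int :=
  let total := nums.sum
  if PySem.Int.mod total 4 ≠ 0 then 0
  else
    let part := PySem.Int.floordiv total 4
    let prefixes := buildPref 0 (PySem.List.slice nums none (some (-1)))
    loopB part prefixes (sufList part prefixes) 0 0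

-- ===== PRECONDITION & SPEC =====
def Spec_countWaysToSplitIntoFourParts (nums : List Int) (out : Int) : Prop := out = countWaysToSplitIntoFourParts_alt nums
instance (nums : List Int) (out : Int) : Decidable (Spec_countWaysToSplitIntoFourParts nums out) := by unfold Spec_countWaysToSplitIntoFourParts; infer_instance

-- ===== CLAIM (what is proved, stated in full; the proofs are below) =====
def Claim_equal_countWaysToSplitIntoFourParts : Prop := ∀ (nums : List Int), Dom_countWaysToSplitIntoFourParts nums → Spec_countWaysToSplitIntoFourParts nums (countWaysToSplitIntoFourParts nums)

-- ===== LEMMAS AND PROOFS =====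
-- counting abstractions over the prefix-sum list Q
def cnt3 (p : Int) : List Int → Int
  | [] => 0
  | q :: t => (if q = 3 * p then 1 else 0) + cnt3 p t

def pairsC (p : Int) : List Int → Int
  | [] => 0
  | q :: t => (if q = 2 * p then cnt3 p t else 0) + pairsC p t

def tripC (p : Int) : List Int → Int
  | [] => 0
  | q :: t => (if q = p then pairsC p t else 0) + tripC p t

theorem sufList_headD (p : Int) (Q : List Int) : (sufList p Q).headD 0 = cnt3 p Q := by
  induction Q with
  | nil => rfl
  | cons q t ih =>
      simp only [sufList, cnt3, List.headD_cons]
      rw [ih]; ring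

theorem loopB_eq (p : Int) (Q : List Int) : ∀ (count c1 : Int),
    loopB p Q (sufList p Q) count c1 = count + c1 * pairsC p Q + tripC p Q := by
  induction Q with
  | nil => intro count c1; simp [loopB, pairsC, tripC]
  | cons q t ih =>
      intro count c1
      show loopB p t (sufList p (q :: t)).tail _ _ = _
      have htail : (sufList p (q :: t)).tail = sufList p t := by simp [sufList]
      rw [htail, sufList_headD, ih]
      simp only [pairsC, tripC]
      split_ifs <;> ring

theorem foldA_eq (p : Int) (xs : List Int) : ∀ (s c1 c2 cnt : Int),
    (xs.foldl (stepA p) (s, c1, c2, cnt)).2.2.2 =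
      cnt + c2 * cnt3 p (buildPref s xs) + c1 * pairsC p (buildPref s xs) + tripC p (buildPref s xs) := by
  induction xs with
  | nil => intro s c1 c2 cnt; simp [buildPref, cnt3, pairsC, tripC]
  | cons x t ih =>
      intro s c1 c2 cnt
      rw [List.foldl_cons]
      show (t.foldl (stepA p) (stepA p (s, c1, c2, cnt) x)).2.2.2 = _
      simp only [stepA]
      rw [ih]
      simp only [buildPref, cnt3, pairsC, tripC]
      split_ifs <;> ring

theorem countWays_eq_ne (nums : List Int) (hne : nums ≠ []) :
    countWaysToSplitIntoFourParts nums = countWaysToSplitIntoFourParts_alt nums := by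
  have hpos : 0 < nums.length := List.length_pos_of_ne_nil hne
  have hlen : ((nums.length : Int) - 1) = ((nums.dropLast.length : Int)) := by
    simp only [List.length_dropLast]; omega
  simp only [countWaysToSplitIntoFourParts, countWaysToSplitIntoFourParts_alt]
  split_ifs with hm
  · rfl
  · set p := PySem.Int.floordiv nums.sum 4 with hp
    have hslice : PySem.List.slice nums none (some (-1)) = nums.dropLast :=
      PySem.List.slice_to_neg_one nums
    have hcong : ∀ (st : Int × Int × Int × Int), ∀ i ∈ PySem.List.pyRange 0 ((nums.dropLast.length : Int)) 1,
        stepA p st (PySem.List.pyGetD nums i 0)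
          = stepA p st (PySem.List.pyGetD nums.dropLast i 0) := by
      intro st i hi
      rw [PySem.List.mem_pyRange_one] at hi
      have h1 : i < ((nums.dropLast.length : Int)) := hi.2
      have h2 : i < ((nums.length : Int)) := by
        simp only [List.length_dropLast] at h1 ⊢; omega
      rw [PySem.List.pyGetD_eq_getElem nums 0 hi.1 h2,
          PySem.List.pyGetD_eq_getElem nums.dropLast 0 hi.1 h1]
      congr 1
      rw [List.getElem_dropLast]
    have hfold : (PySem.List.pyRange 0 ((nums.length : Int) - 1) 1).foldl
        (fun st i => stepA p st (PySem.List.pyGetD nums i 0)) ((0, 0, 0, 0) : Int × Int × Int × Int)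
        = nums.dropLast.foldl (stepA p) (0, 0, 0, 0) := by
      rw [hlen]
      rw [PySem.List.foldl_congr_mem _ _ _ _ hcong]
      exact PySem.List.foldl_pyRange_zero_pyGetD' nums.dropLast 0 (stepA p) (0, 0, 0, 0)
    rw [hfold, foldA_eq, hslice, loopB_eq]
    ring

-- ===== VERDICT (by name: the statement is the Claim_ definition above) =====
theorem countWaysToSplitIntoFourParts_spec : Claim_equal_countWaysToSplitIntoFourParts := by
  intro nums _
  unfold Spec_countWaysToSplitIntoFourParts
  rcases List.eq_nil_or_concat nums with rfl | ⟨ys, y, rfl⟩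
  · decide
  · exact countWays_eq_ne _ (by simp)
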